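-- pv_equiv track=rewrite | github.com/neojie/vatic | interpy/write_vasp_xdatcar.py | _symbol_count_from_symbols
-- ===== SOURCE A (Python) =====
-- def _symbol_count_from_symbols(symbols):
--     """Reduce list of chemical symbols into compact VASP notation
--
--     args:
--         symbols (iterable of str)
--
--     returns:
--         list of pairs [(el1, c1), (el2, c2), ...]
--     """
--     sc = []
--     psym = symbols[0]
--     count = 0
--     for sym in symbols:
--         if sym != psym:
--             sc.append((psym, count))
--             psym = sym
--             count = 1
--         else:
--             count += 1
--     sc.append((psym, count))
--     return sc
-- ===== SOURCE B (Python) =====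
-- def _symbol_count_from_symbols(symbols):
--     """Run-length encode consecutive chemical symbols into (symbol, count) pairs."""
--     sc = []
--     i = 0
--     n = len(symbols)
--     while i < n:
--         sym = symbols[i]
--         j = i
--         while j < n and symbols[j] == sym:
--             j += 1
--         sc.append((sym, j - i))
--         i = j
--     return sc
-- ===== Notes on version B (the rewrite author's own statement) =====
-- stated objective: alternative
-- what changed: Replaces A's single-pass previous-symbol/counter state machine with a two-index run-at-a-time scan: each outer step advances an index over one whole run of equal symbols and emits (symbol, run length) at once, so no psym/count state is threaded across iterations.
-- outside the precondition, e.g. on _symbol_count_from_symbols([]): A raises IndexError, B returns []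
-- crash fix: On an empty symbols list A raises IndexError (symbols[0]); B returns []. — e.g. on _symbol_count_from_symbols([]): A raises IndexError, B returns []
import Mathlib
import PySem

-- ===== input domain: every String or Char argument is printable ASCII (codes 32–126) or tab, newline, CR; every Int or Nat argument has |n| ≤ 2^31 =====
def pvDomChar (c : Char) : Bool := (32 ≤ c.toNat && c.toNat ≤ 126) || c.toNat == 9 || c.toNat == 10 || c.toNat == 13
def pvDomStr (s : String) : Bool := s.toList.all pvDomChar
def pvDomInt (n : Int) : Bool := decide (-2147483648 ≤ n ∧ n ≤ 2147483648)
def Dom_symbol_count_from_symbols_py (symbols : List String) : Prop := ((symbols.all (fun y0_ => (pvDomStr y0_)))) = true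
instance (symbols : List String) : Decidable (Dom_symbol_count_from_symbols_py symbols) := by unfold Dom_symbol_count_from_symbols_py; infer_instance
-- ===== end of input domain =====

-- B replaces A's previous-symbol/counter state machine with a two-index run-at-a-time scan (alternative decomposition, same cost); A raises IndexError on [], which Pre_ excludes.

-- ===== PORT A =====
-- the for-loop of A: state (sc, psym, count), branches in A's order
def pvALoop (xs : List String) (sc : List (String × Int)) (psym : String) (count : Int) :
    List (String × Int) × String × Int :=
  match xs with
  | [] => (sc, psym, count)
  | sym :: rest =>
    if sym ≠ psym then pvALoop rest (sc ++ [(psym, count)]) sym 1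
    else pvALoop rest sc psym (count + 1)

def symbol_count_from_symbols_py (symbols : List String) : List (String × Int) :=
  match symbols with
  | [] => []    -- symbols[0] raises IndexError here; excluded by Pre_
  | s0 :: _ =>
    let (sc, psym, count) := pvALoop symbols [] s0 0
    sc ++ [(psym, count)]

-- ===== PORT B =====
-- B's inner while 'while j < n and symbols[j] == sym: j += 1', fuel-counted (fuel = n - j
-- at entry, so it never runs out before the guard fails); 'symbols[j]' is accessed only
-- under 'j < n', so 'getD' is exact there
def pvInner (symbols : List String) (n : Nat) (sym : String) : Nat → Nat → Nat
  | 0, j => j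
  | fuel + 1, j =>
    if j < n ∧ (symbols.getD j "" == sym) = true then pvInner symbols n sym fuel (j + 1)
    else j

-- B's outer while 'while i < n: …', fuel-counted (fuel = n at entry), appending one
-- (symbol, run length) pair per run
def pvOuter (symbols : List String) (n : Nat) : Nat → Nat → List (String × Int) → List (String × Int)
  | 0, _, sc => sc
  | fuel + 1, i, sc =>
    if i < n then
      let sym := symbols.getD i ""
      let j := pvInner symbols n sym (n - i) i
      pvOuter symbols n fuel j (sc ++ [(sym, (j : Int) - (i : Int))])
    else sc

def symbol_count_from_symbols_py_alt (symbols : List String) : List (String × Int) :=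
  pvOuter symbols symbols.length symbols.length 0 []

-- ===== PRECONDITION & SPEC =====
-- Pre_ excludes the empty list, on which A raises IndexError (symbols[0]).
def Pre_symbol_count_from_symbols_py (symbols : List String) : Prop := symbols ≠ []
instance (symbols : List String) : Decidable (Pre_symbol_count_from_symbols_py symbols) := by unfold Pre_symbol_count_from_symbols_py; infer_instance
def pvWitness_symbol_count_from_symbols_py : List String := ["H", "H", "O"]

-- On an empty symbols list A raises IndexError (symbols[0]); B returns [].
def Raises_symbol_count_from_symbols_py (symbols : List String) : Prop := symbols = []
instance (symbols : List String) : Decidable (Raises_symbol_count_from_symbols_py symbols) := by unfold Raises_symbol_count_from_symbols_py; infer_instance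
def pvRaiseWitness_symbol_count_from_symbols_py : List String := []
def pvRaiseWitnessOut_symbol_count_from_symbols_py : List (String × Int) := []

def Spec_symbol_count_from_symbols_py (symbols : List String) (out : List (String × Int)) : Prop := out = symbol_count_from_symbols_py_alt symbols
instance (symbols : List String) (out : List (String × Int)) : Decidable (Spec_symbol_count_from_symbols_py symbols out) := by unfold Spec_symbol_count_from_symbols_py; infer_instance

-- ===== CLAIM (what is proved, stated in full; the proofs are below) =====
def Claim_equal_symbol_count_from_symbols_py : Prop := ∀ (symbols : List String), Dom_symbol_count_from_symbols_py symbols → Pre_symbol_count_from_symbols_py symbols → Spec_symbol_count_from_symbols_py symbols (symbol_count_from_symbols_py symbols)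
def Claim_raises_symbol_count_from_symbols_py : Prop := (∀ (symbols : List String), Dom_symbol_count_from_symbols_py symbols → Raises_symbol_count_from_symbols_py symbols → ¬ Pre_symbol_count_from_symbols_py symbols) ∧ (Dom_symbol_count_from_symbols_py (pvRaiseWitness_symbol_count_from_symbols_py) ∧ Raises_symbol_count_from_symbols_py (pvRaiseWitness_symbol_count_from_symbols_py) ∧ symbol_count_from_symbols_py_alt (pvRaiseWitness_symbol_count_from_symbols_py) = pvRaiseWitnessOut_symbol_count_from_symbols_py)

-- ===== LEMMAS AND PROOFS =====

-- length of the prefix run of entries equal to sym (proof-only description of pvInner)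
def pvRunLen (sym : String) : List String → Nat
  | [] => 0
  | x :: xs => if x == sym then pvRunLen sym xs + 1 else 0

theorem pvRunLen_cons_self (sym : String) (xs : List String) :
    pvRunLen sym (sym :: xs) = pvRunLen sym xs + 1 := by
  simp [pvRunLen]

theorem pvRunLen_le_length (sym : String) (l : List String) : pvRunLen sym l ≤ l.length := by
  induction l with
  | nil => simp [pvRunLen]
  | cons x xs ih =>
    by_cases h : (x == sym) = true
    · simp [pvRunLen, h]; omega
    · simp [pvRunLen, h]

-- proof-only recursion: the run-length encoding, one run at a time
def pvRLE : List String → List (String × Int)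
  | [] => []
  | x :: xs =>
    let run := pvRunLen x (x :: xs)
    (x, (run : Int)) :: pvRLE ((x :: xs).drop run)
termination_by l => l.length
decreasing_by
  simp [pvRunLen_cons_self]

theorem pvRLE_cons (x : String) (xs : List String) :
    pvRLE (x :: xs)
      = (x, (pvRunLen x (x :: xs) : Int)) :: pvRLE ((x :: xs).drop (pvRunLen x (x :: xs))) := by
  rw [pvRLE]

-- pvInner computes j plus the prefix-run length of the rest of the list, once the fuel
-- covers the distance from j to the end
theorem pvInner_eq (symbols : List String) (sym : String) :
    ∀ (fuel j : Nat), symbols.length - j ≤ fuel →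
      pvInner symbols symbols.length sym fuel j = j + pvRunLen sym (symbols.drop j) := by
  intro fuel
  induction fuel with
  | zero =>
    intro j hf
    have hd : symbols.drop j = [] := List.drop_eq_nil_of_le (by omega)
    simp [pvInner, hd, pvRunLen]
  | succ fuel ih =>
    intro j hf
    by_cases h : j < symbols.length
    · have hd : symbols.drop j = symbols[j] :: symbols.drop (j + 1) :=
        List.drop_eq_getElem_cons h
      have hg : symbols.getD j "" = symbols[j] := List.getD_eq_getElem symbols "" h
      by_cases hk : (symbols[j] == sym) = true
      · rw [show pvInner symbols symbols.length sym (fuel + 1) j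
              = pvInner symbols symbols.length sym fuel (j + 1) from by
            simp [pvInner, h, hg, hk]]
        rw [ih (j + 1) (by omega), hd]
        simp [pvRunLen, hk]
        omega
      · have hcond : ¬ (j < symbols.length ∧ (symbols.getD j "" == sym) = true) := by
          rw [hg]; tauto
        rw [show pvInner symbols symbols.length sym (fuel + 1) j = j from by
            simp only [pvInner]; rw [if_neg hcond]]
        rw [hd]
        simp [pvRunLen, hk]
    · have hd : symbols.drop j = [] := List.drop_eq_nil_of_le (by omega)
      simp [pvInner, h, hd, pvRunLen]

-- invariant of B's outer loop: it appends the encoding of the unread suffix, once the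
-- fuel covers the distance from i to the end
theorem pvOuter_eq (symbols : List String) :
    ∀ (fuel i : Nat) (sc : List (String × Int)), symbols.length - i ≤ fuel →
      pvOuter symbols symbols.length fuel i sc = sc ++ pvRLE (symbols.drop i) := by
  intro fuel
  induction fuel with
  | zero =>
    intro i sc hf
    have hd : symbols.drop i = [] := List.drop_eq_nil_of_le (by omega)
    simp [pvOuter, hd, pvRLE]
  | succ fuel ih =>
    intro i sc hf
    by_cases h : i < symbols.length
    · have hdrop : symbols.drop i = symbols[i] :: symbols.drop (i + 1) :=
        List.drop_eq_getElem_cons h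
      have hg : symbols.getD i "" = symbols[i] := List.getD_eq_getElem symbols "" h
      have hrun : pvRunLen symbols[i] (symbols.drop i) = pvRunLen symbols[i] (symbols.drop (i + 1)) + 1 := by
        rw [hdrop, pvRunLen_cons_self]
      have hrle : pvRunLen symbols[i] (symbols.drop i) ≤ symbols.length - i := by
        have := pvRunLen_le_length symbols[i] (symbols.drop i)
        simpa using this
      have hinner : pvInner symbols symbols.length symbols[i] (symbols.length - i) i
          = i + pvRunLen symbols[i] (symbols.drop i) :=
        pvInner_eq symbols symbols[i] (symbols.length - i) i (by omega)
      rw [show pvOuter symbols symbols.length (fuel + 1) i sc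
            = pvOuter symbols symbols.length fuel
                (pvInner symbols symbols.length (symbols.getD i "") (symbols.length - i) i)
                (sc ++ [(symbols.getD i "",
                  ((pvInner symbols symbols.length (symbols.getD i "") (symbols.length - i) i : Int)
                    - (i : Int)))]) from by
          simp [pvOuter, h]]
      rw [hg, hinner]
      rw [ih (i + pvRunLen symbols[i] (symbols.drop i)) _ (by omega)]
      rw [show symbols.drop (i + pvRunLen symbols[i] (symbols.drop i))
            = (symbols.drop i).drop (pvRunLen symbols[i] (symbols.drop i)) from by
          rw [List.drop_drop]]
      rw [hdrop, pvRLE_cons, ← hdrop]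
      have hc : ((i + pvRunLen symbols[i] (symbols.drop i) : Nat) : Int) - (i : Int)
          = (pvRunLen symbols[i] (symbols.drop i) : Int) := by push_cast; ring
      simp [hc, List.append_assoc]
    · have hd : symbols.drop i = [] := List.drop_eq_nil_of_le (by omega)
      simp [pvOuter, h, hd, pvRLE]

theorem pvAlt_eq_pvRLE (symbols : List String) :
    symbol_count_from_symbols_py_alt symbols = pvRLE symbols := by
  show pvOuter symbols symbols.length symbols.length 0 [] = _
  rw [pvOuter_eq symbols symbols.length 0 [] (by omega)]
  simp

-- closing A's loop state: emit the pending (psym, count) pair after the loop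
def pvFinish (t : List (String × Int) × String × Int) : List (String × Int) :=
  t.1 ++ [(t.2.1, t.2.2)]

theorem pvFinish_let (t : List (String × Int) × String × Int) :
    (let (sc, psym, count) := t; sc ++ [(psym, count)]) = pvFinish t := by
  rcases t with ⟨a, b, c⟩; rfl

-- invariant of A's loop: flushing the open run (psym, count) and continuing equals
-- the already-emitted pairs, the open run extended by its prefix continuation in xs,
-- then the run-length encoding of the remainder.
theorem pvALoop_spec : ∀ (xs : List String) (sc : List (String × Int)) (psym : String) (count : Int),
    pvFinish (pvALoop xs sc psym count)
    = sc ++ (psym, count + (pvRunLen psym xs : Int)) :: pvRLE (xs.drop (pvRunLen psym xs)) := by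
  intro xs
  induction xs with
  | nil =>
    intro sc psym count
    simp [pvALoop, pvRunLen, pvFinish, pvRLE]
  | cons sym rest ih =>
    intro sc psym count
    by_cases h : sym = psym
    · subst h
      rw [show pvALoop (sym :: rest) sc sym count = pvALoop rest sc sym (count + 1) from by
        simp [pvALoop]]
      rw [ih, pvRunLen_cons_self]
      push_cast
      ring_nf
      rw [show 1 + pvRunLen sym rest = pvRunLen sym rest + 1 from Nat.add_comm _ _,
        List.drop_succ_cons]
    · rw [show pvALoop (sym :: rest) sc psym count = pvALoop rest (sc ++ [(psym, count)]) sym 1 from by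
        simp [pvALoop, h]]
      rw [ih,
        show pvRunLen psym (sym :: rest) = 0 from by simp [pvRunLen, h],
        List.drop_zero, pvRLE_cons]
      simp [pvRunLen_cons_self]
      ring

-- ===== VERDICT (by name: the statement is the Claim_ definition above) =====
theorem symbol_count_from_symbols_py_spec : Claim_equal_symbol_count_from_symbols_py := by
  intro symbols _ hpre
  unfold Spec_symbol_count_from_symbols_py
  rw [pvAlt_eq_pvRLE]
  match symbols with
  | [] => exact absurd rfl hpre
  | s0 :: rest =>
    show (let (sc, psym, count) := pvALoop (s0 :: rest) [] s0 0; sc ++ [(psym, count)]) = _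
    rw [pvFinish_let,
      show pvALoop (s0 :: rest) [] s0 0 = pvALoop rest [] s0 1 from by simp [pvALoop],
      pvALoop_spec, pvRLE_cons]
    simp [pvRunLen_cons_self]
    omega

@[simp] theorem symbol_count_from_symbols_py_raises : Claim_raises_symbol_count_from_symbols_py := by
  unfold Claim_raises_symbol_count_from_symbols_py
  refine ⟨fun s _ h => by simp [Raises_symbol_count_from_symbols_py] at h; simp [h, Pre_symbol_count_from_symbols_py],
    by decide, by decide, by decide⟩
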